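-- pv_equiv track=rewrite | github.com/AswinArun7/DSA-GRIND | Grind py/KV_max_valid_subarray.py | max_valid_subarray
-- ===== SOURCE A (Python) =====
-- def max_valid_subarray(arr,k):
--     n=len(arr)
--     max_len=0
--     for i in range(n):
--         for j in range(i,n):
--             sub =arr[i:j+1]
--             s=sum(sub)
--             if s<k and not ap_sub(sub):
--                 max_len=max(max_len,len(sub))
--
--     return max_len
--
-- def ap_sub(sub):
--     if len(sub)<2:
--         return False
--     d=sub[1]-sub[0]
--     for i in range(2,len(sub)):
--         if sub[i]-sub[i-1]!=d:
--             return False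
--     return True
-- ===== SOURCE B (Python) =====
-- def max_valid_subarray(arr, k):
--     n = len(arr)
--     best = 0
--     for i in range(n):
--         s = 0
--         d = 0
--         ap = False
--         for j in range(i, n):
--             s += arr[j]
--             if j == i:
--                 ap = False
--             elif j == i + 1:
--                 d = arr[j] - arr[j - 1]
--                 ap = True
--             else:
--                 ap = ap and (arr[j] - arr[j - 1] == d)
--             if s < k and not ap:
--                 best = max(best, j - i + 1)
--     return best
-- ===== Notes on version B (the rewrite author's own statement) =====
-- stated objective: faster
-- what changed: B replaces A's enumeration of every slice arr[i:j+1] with a fresh sum() and a fresh arithmetic-progression scan (O(n^3)) by, for each start i, one pass that maintains an incremental running sum and an incremental AP flag (d fixed at the second element, ap &= next difference equals d), updating the best length on the fly (O(n^2)).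
import Mathlib
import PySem

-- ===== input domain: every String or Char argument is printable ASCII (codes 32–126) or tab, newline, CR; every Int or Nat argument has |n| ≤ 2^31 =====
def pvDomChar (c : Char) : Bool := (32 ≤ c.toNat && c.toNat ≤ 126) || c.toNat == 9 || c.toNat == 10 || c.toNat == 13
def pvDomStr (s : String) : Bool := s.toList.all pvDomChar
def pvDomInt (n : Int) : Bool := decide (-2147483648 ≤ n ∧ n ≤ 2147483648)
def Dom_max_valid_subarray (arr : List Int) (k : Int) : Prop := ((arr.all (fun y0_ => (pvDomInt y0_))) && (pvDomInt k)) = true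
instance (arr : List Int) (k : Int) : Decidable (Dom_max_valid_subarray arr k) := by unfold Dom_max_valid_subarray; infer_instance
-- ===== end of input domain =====

-- B replaces A's O(n^3) scan over all (i,j) slices with per-start incremental running sums
-- and incremental arithmetic-progression tracking (O(n^2)); same return value everywhere.

-- ===== PORT A =====
-- loop 'for i in range(2, len(sub))' of ap_sub, with its early 'return False'
-- (indices are always in range here, so the pyGetD default 0 is never used)
def apLoop (sub : List Int) (d : Int) : List Int → Bool
  | [] => true
  | i :: rest =>
    if PySem.List.pyGetD sub i 0 - PySem.List.pyGetD sub (i - 1) 0 ≠ d then false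
    else apLoop sub d rest

def ap_sub (sub : List Int) : Bool :=
  if (sub.length : Int) < 2 then false
  else
    let d := PySem.List.pyGetD sub 1 0 - PySem.List.pyGetD sub 0 0
    apLoop sub d (PySem.List.pyRange 2 (sub.length : Int) 1)

-- body of A's inner 'for j' loop
def stepA (arr : List Int) (k i : Int) (max_len j : Int) : Int :=
  let sub := PySem.List.slice arr (some i) (some (j + 1))
  let s := sub.sum
  if s < k ∧ ap_sub sub = false then max max_len (sub.length : Int) else max_len

def max_valid_subarray (arr : List Int) (k : Int) : Int :=
  -- n = len(arr) appears as (arr.length : Int)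
  (PySem.List.pyRange 0 (arr.length : Int) 1).foldl
    (fun max_len i => (PySem.List.pyRange i (arr.length : Int) 1).foldl (stepA arr k i) max_len) 0

-- ===== PORT B =====
-- body of B's inner 'for j' loop; state st = (s, d, ap, best)
def stepB (arr : List Int) (k i : Int) (st : Int × Int × Bool × Int) (j : Int) :
    Int × Int × Bool × Int :=
  let s := st.1 + PySem.List.pyGetD arr j 0
  let dap : Int × Bool :=
    if j = i then (st.2.1, false)
    else if j = i + 1 then (PySem.List.pyGetD arr j 0 - PySem.List.pyGetD arr (j - 1) 0, true)
    else (st.2.1, st.2.2.1 && (PySem.List.pyGetD arr j 0 - PySem.List.pyGetD arr (j - 1) 0 == st.2.1))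
  let best := if s < k ∧ dap.2 = false then max st.2.2.2 (j - i + 1) else st.2.2.2
  (s, dap.1, dap.2, best)

def max_valid_subarray_alt (arr : List Int) (k : Int) : Int :=
  (PySem.List.pyRange 0 (arr.length : Int) 1).foldl
    (fun best i =>
      ((PySem.List.pyRange i (arr.length : Int) 1).foldl (stepB arr k i) (0, 0, false, best)).2.2.2) 0

-- ===== PRECONDITION & SPEC =====
def Spec_max_valid_subarray (arr : List Int) (k : Int) (out : Int) : Prop := out = max_valid_subarray_alt arr k
instance (arr : List Int) (k : Int) (out : Int) : Decidable (Spec_max_valid_subarray arr k out) := by unfold Spec_max_valid_subarray; infer_instance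

-- ===== CLAIM (what is proved, stated in full; the proofs are below) =====
def Claim_equal_max_valid_subarray : Prop := ∀ (arr : List Int) (k : Int), Dom_max_valid_subarray arr k → Spec_max_valid_subarray arr k (max_valid_subarray arr k)

-- ===== LEMMAS AND PROOFS =====

-- the subarray arr[i:t] for Nat indices
def subArr (arr : List Int) (i t : Nat) : List Int := (arr.drop i).take (t - i)

-- the d-component of B's state after processing arr[i:t]
def dVal (arr : List Int) (i t : Nat) : Int :=
  if i + 2 ≤ t then arr.getD (i + 1) 0 - arr.getD i 0 else 0

lemma sub_slice (arr : List Int) (i t : Nat) :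
    PySem.List.slice arr (some (i : Int)) (some (t : Int)) = subArr arr i t := by
  simp [subArr, PySem.List.slice_natCast]

lemma apLoop_append (s : List Int) (d : Int) (r1 r2 : List Int) :
    apLoop s d (r1 ++ r2) = (apLoop s d r1 && apLoop s d r2) := by
  induction r1 with
  | nil => simp [apLoop]
  | cons a r ih => by_cases h : PySem.List.pyGetD s a 0 - PySem.List.pyGetD s (a - 1) 0 ≠ d <;>
      simp [apLoop, h, ih]

lemma apLoop_congr (s₁ s₂ : List Int) (d : Int) (r : List Int)
    (h : ∀ idx ∈ r, PySem.List.pyGetD s₁ idx 0 = PySem.List.pyGetD s₂ idx 0 ∧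
      PySem.List.pyGetD s₁ (idx - 1) 0 = PySem.List.pyGetD s₂ (idx - 1) 0) :
    apLoop s₁ d r = apLoop s₂ d r := by
  induction r with
  | nil => rfl
  | cons a r ih =>
    have ha := h a (by simp)
    simp only [apLoop, ha.1, ha.2]
    split
    · rfl
    · exact ih (fun idx hm => h idx (by simp [hm]))

lemma pyGetD_nat (xs : List Int) (m : Nat) (hm : m < xs.length) :
    PySem.List.pyGetD xs (m : Int) 0 = xs.getD m 0 := by
  simp [PySem.List.pyGetD_natCast]

lemma beq_decide (a b : Int) : (a == b) = decide (a = b) := by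
  by_cases h : a = b <;> simp [h]

lemma ap_sub_snoc (sub : List Int) (x : Int) (h : 2 ≤ sub.length) :
    ap_sub (sub ++ [x]) =
      (ap_sub sub && (x - sub.getD (sub.length - 1) 0 == sub.getD 1 0 - sub.getD 0 0)) := by
  have hlen : (sub ++ [x]).length = sub.length + 1 := by simp
  have hg : ∀ m : Nat, m < sub.length →
      PySem.List.pyGetD (sub ++ [x]) (m : Int) 0 = sub.getD m 0 := by
    intro m hm
    rw [PySem.List.pyGetD_natCast]
    simp [List.getD_eq_getElem?_getD, List.getElem?_append_left hm]
  have hgl : PySem.List.pyGetD (sub ++ [x]) (sub.length : Int) 0 = x := by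
    rw [PySem.List.pyGetD_natCast]
    simp [List.getD_eq_getElem?_getD]
  have h0 : PySem.List.pyGetD (sub ++ [x]) 0 0 = sub.getD 0 0 := by
    have := hg 0 (by omega); simpa using this
  have h1 : PySem.List.pyGetD (sub ++ [x]) 1 0 = sub.getD 1 0 := by
    have := hg 1 (by omega); simpa using this
  have h0' : PySem.List.pyGetD sub 0 0 = sub.getD 0 0 := by
    have := pyGetD_nat sub 0 (by omega); simpa using this
  have h1' : PySem.List.pyGetD sub 1 0 = sub.getD 1 0 := by
    have := pyGetD_nat sub 1 (by omega); simpa using this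
  unfold ap_sub
  rw [if_neg (by rw [hlen]; push_cast; omega), if_neg (by push_cast; omega)]
  simp only [h0, h1, h0', h1', hlen]
  have hsplit : PySem.List.pyRange 2 ((sub.length + 1 : Nat) : Int) 1 =
      PySem.List.pyRange 2 (sub.length : Int) 1 ++ [(sub.length : Int)] := by
    have hc : ((sub.length + 1 : Nat) : Int) = (sub.length : Int) + 1 := by push_cast; ring
    rw [hc]
    exact PySem.List.pyRange_one_succ_right (by exact_mod_cast h)
  rw [hsplit, apLoop_append]
  congr 1
  · -- the old checks see only the old elements
    apply apLoop_congr
    intro idx hidx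
    rw [PySem.List.mem_pyRange_one] at hidx
    obtain ⟨m, rfl⟩ : ∃ m : Nat, idx = (m : Int) :=
      ⟨idx.toNat, (Int.toNat_of_nonneg (by omega)).symm⟩
    have hm : m < sub.length := by exact_mod_cast hidx.2
    have hm1 : ((m : Int) - 1) = ((m - 1 : Nat) : Int) := by omega
    refine ⟨by rw [hg m hm, pyGetD_nat sub m hm], ?_⟩
    rw [hm1, hg (m - 1) (by omega), pyGetD_nat sub (m - 1) (by omega)]
  · -- the one new check is the snoc comparison
    have hm1 : ((sub.length : Int) - 1) = ((sub.length - 1 : Nat) : Int) := by omega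
    simp only [apLoop, hgl, hm1, hg (sub.length - 1) (by omega)]
    by_cases hx : x - sub.getD (sub.length - 1) 0 = sub.getD 1 0 - sub.getD 0 0 <;>
      simp [hx, beq_decide]

lemma sub_snoc (arr : List Int) (i t : Nat) (hi : i ≤ t) (ht : t < arr.length) :
    subArr arr i (t + 1) = subArr arr i t ++ [arr.getD t 0] := by
  unfold subArr
  have h1 : t + 1 - i = (t - i) + 1 := by omega
  rw [h1, List.take_succ]
  congr 1
  have h2 : t - i < (arr.drop i).length := by simp; omega
  rw [List.getElem?_drop]
  have h3 : i + (t - i) = t := by omega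
  rw [h3, List.getElem?_eq_getElem ht]
  simp [List.getD_eq_getElem?_getD, List.getElem?_eq_getElem ht]

lemma sub_length (arr : List Int) (i t : Nat) (hi : i ≤ t) (ht : t ≤ arr.length) :
    (subArr arr i t).length = t - i := by
  simp [subArr]; omega

lemma sub_getD (arr : List Int) (i t m : Nat) (hm : m < t - i) (ht : t ≤ arr.length) :
    (subArr arr i t).getD m 0 = arr.getD (i + m) 0 := by
  have hmt : i + m < arr.length := by omega
  simp [subArr, List.getD_eq_getElem?_getD, List.getElem?_take, List.getElem?_drop, hm,
    List.getElem?_eq_getElem hmt]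

lemma ap_sub_singleton (a : Int) : ap_sub [a] = false := by simp [ap_sub]

lemma ap_sub_two (sub : List Int) (h : sub.length = 2) : ap_sub sub = true := by
  simp [ap_sub, h, PySem.List.pyRange_one_eq_nil, apLoop]

lemma sub_base (arr : List Int) (i : Nat) (hi : i < arr.length) :
    subArr arr i (i + 1) = [arr.getD i 0] := by
  have := sub_snoc arr i i (le_refl i) hi
  simpa [subArr] using this

-- one step of the inner loops, at j = t, starting from the invariant state
lemma stepB_step (arr : List Int) (k : Int) (i t : Nat) (hit : i < t) (htlen : t < arr.length)
    (bst : Int) :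
    stepB arr k (i : Int) ((subArr arr i t).sum, dVal arr i t, ap_sub (subArr arr i t), bst)
        (t : Int) =
      ((subArr arr i (t + 1)).sum, dVal arr i (t + 1), ap_sub (subArr arr i (t + 1)),
        stepA arr k (i : Int) bst (t : Int)) := by
  have hgt : PySem.List.pyGetD arr (t : Int) 0 = arr.getD t 0 := pyGetD_nat arr t htlen
  have hgt1 : PySem.List.pyGetD arr ((t : Int) - 1) 0 = arr.getD (t - 1) 0 := by
    have hc : ((t : Int) - 1) = ((t - 1 : Nat) : Int) := by omega
    rw [hc]; exact pyGetD_nat arr (t - 1) (by omega)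
  have hsnoc := sub_snoc arr i t (by omega) htlen
  have hsum : (subArr arr i (t + 1)).sum = (subArr arr i t).sum + arr.getD t 0 := by
    rw [hsnoc]; simp
  have hslice : PySem.List.slice arr (some (i : Int)) (some ((t : Int) + 1)) =
      subArr arr i (t + 1) := by
    have hc : (t : Int) + 1 = ((t + 1 : Nat) : Int) := by push_cast; ring
    rw [hc, sub_slice]
  have hlench : ((subArr arr i (t + 1)).length : Int) = (t : Int) - (i : Int) + 1 := by
    rw [sub_length arr i (t + 1) (by omega) (by omega)]; omega
  have hne : ¬ ((t : Int) = (i : Int)) := by omega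
  by_cases hcase : t = i + 1
  · -- second element: d is set, ap becomes True
    subst hcase
    have hap : ap_sub (subArr arr i (i + 1 + 1)) = true :=
      ap_sub_two _ (by rw [sub_length arr i (i + 1 + 1) (by omega) (by omega)]; omega)
    have hd1 : dVal arr i (i + 1 + 1) = arr.getD (i + 1) 0 - arr.getD i 0 := by
      unfold dVal; rw [if_pos (by omega)]
    have hi1 : i + 1 - 1 = i := by omega
    simp only [stepB, stepA, if_neg hne, if_pos (by push_cast; ring : ((i+1:Nat) : Int) = (i : Int) + 1),
      hgt, hgt1, hslice, hi1, Prod.mk.injEq]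
    refine ⟨by rw [hsum], by rw [hd1], by rw [hap], by rw [hap]; simp⟩
  · -- later element: the incremental AP check matches ap_sub of the longer slice
    have hge : i + 2 ≤ t := by omega
    have hne1 : ¬ ((t : Int) = (i : Int) + 1) := by omega
    have hL : (subArr arr i t).length = t - i := sub_length arr i t (by omega) (by omega)
    have hAP : ap_sub (subArr arr i (t + 1)) =
        (ap_sub (subArr arr i t) && (arr.getD t 0 - arr.getD (t - 1) 0 == dVal arr i t)) := by
      rw [hsnoc, ap_sub_snoc _ _ (by omega), hL,
        sub_getD arr i t (t - i - 1) (by omega) (by omega),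
        sub_getD arr i t 1 (by omega) (by omega),
        sub_getD arr i t 0 (by omega) (by omega),
        (by omega : i + (t - i - 1) = t - 1)]
      unfold dVal
      rw [if_pos hge]
      simp
    have hD : dVal arr i (t + 1) = dVal arr i t := by
      unfold dVal; rw [if_pos (by omega), if_pos hge]
    simp only [stepB, stepA, if_neg hne, if_neg hne1, hgt, hgt1, hslice, Prod.mk.injEq]
    refine ⟨by rw [hsum], by rw [hD], by rw [hAP], ?_⟩
    rw [hAP, ← hsum, hlench]

-- the inner-loop invariant: after processing j = i .. t-1, B's state is
-- (sum of arr[i:t], running d, ap_sub arr[i:t], A's running max)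
lemma inner_inv (arr : List Int) (k : Int) (i : Nat) (b : Int) :
    ∀ t : Nat, i < t → t ≤ arr.length →
    (PySem.List.pyRange (i : Int) (t : Int) 1).foldl (stepB arr k (i : Int)) (0, 0, false, b) =
      ((subArr arr i t).sum, dVal arr i t, ap_sub (subArr arr i t),
        (PySem.List.pyRange (i : Int) (t : Int) 1).foldl (stepA arr k (i : Int)) b) := by
  intro t ht
  induction t, ht using Nat.le_induction with
  | base =>
    intro hlen
    have hlen' : i < arr.length := by omega
    have hpr : PySem.List.pyRange (i : Int) ((i + 1 : Nat) : Int) 1 = [(i : Int)] := by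
      have hc : ((i + 1 : Nat) : Int) = (i : Int) + 1 := by push_cast; ring
      rw [hc, PySem.List.pyRange_one_singleton]
    rw [hpr]
    have hsub : subArr arr i (i + 1) = [arr.getD i 0] := sub_base arr i hlen'
    have hslice : PySem.List.slice arr (some (i : Int)) (some ((i : Int) + 1)) =
        [arr.getD i 0] := by
      have hc : (i : Int) + 1 = ((i + 1 : Nat) : Int) := by push_cast; ring
      rw [hc, sub_slice, hsub]
    have hd0 : dVal arr i (i + 1) = 0 := by unfold dVal; rw [if_neg (by omega)]
    simp only [List.foldl, stepB, stepA, hslice, hsub, if_pos rfl, hd0,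
      pyGetD_nat arr i hlen', ap_sub_singleton, Prod.mk.injEq]
    simp
  | succ t ht ih =>
    intro hlen
    have ih' := ih (by omega)
    have hcast : ((t + 1 : Nat) : Int) = (t : Int) + 1 := by push_cast; ring
    rw [hcast, PySem.List.pyRange_one_succ_right (by exact_mod_cast Nat.le_of_lt ht),
      List.foldl_append, List.foldl_append, ih']
    simp only [List.foldl]
    exact stepB_step arr k i t ht (by omega) _

lemma inner_eq (arr : List Int) (k : Int) (i : Nat) (b : Int) (hi : i < arr.length) :
    ((PySem.List.pyRange (i : Int) (arr.length : Int) 1).foldl (stepB arr k (i : Int))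
        (0, 0, false, b)).2.2.2 =
      (PySem.List.pyRange (i : Int) (arr.length : Int) 1).foldl (stepA arr k (i : Int)) b := by
  rw [inner_inv arr k i b arr.length hi le_rfl]

-- ===== VERDICT (by name: the statement is the Claim_ definition above) =====
theorem max_valid_subarray_spec : Claim_equal_max_valid_subarray := by
  intro arr k _
  unfold Spec_max_valid_subarray max_valid_subarray max_valid_subarray_alt
  apply PySem.List.foldl_congr_mem
  intro acc i hi
  rw [PySem.List.mem_pyRange_one] at hi
  obtain ⟨m, rfl⟩ : ∃ m : Nat, i = (m : Int) := ⟨i.toNat, (Int.toNat_of_nonneg hi.1).symm⟩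
  have hm : m < arr.length := by exact_mod_cast hi.2
  exact (inner_eq arr k m acc hm).symm
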